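-- pv_equiv track=rewrite | github.com/K-Amor23/MorningMaghreb | apps/backend/etl/compute_ratios.py | get_ratio_category
-- ===== SOURCE A (Python) =====
-- def get_ratio_category(ratio_name: str) -> str:
--     """Get the category of a ratio"""
--     categories = {
--         'profitability': ['gross_margin', 'operating_margin', 'net_margin', 'roe', 'roa'],
--         'liquidity': ['current_ratio', 'quick_ratio', 'cash_ratio'],
--         'solvency': ['debt_to_equity', 'debt_to_assets', 'interest_coverage'],
--         'efficiency': ['asset_turnover', 'inventory_turnover', 'receivables_turnover']
--     }
--
--     for category, ratios in categories.items():
--         if ratio_name in ratios: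
--             return category
--
--     return 'other'
-- ===== SOURCE B (Python) =====
-- # (name, category) pairs, stored SORTED by ratio name for binary search.
-- _SORTED_TABLE = [
--     ('asset_turnover', 'efficiency'),
--     ('cash_ratio', 'liquidity'),
--     ('current_ratio', 'liquidity'),
--     ('debt_to_assets', 'solvency'),
--     ('debt_to_equity', 'solvency'),
--     ('gross_margin', 'profitability'),
--     ('interest_coverage', 'solvency'),
--     ('inventory_turnover', 'efficiency'),
--     ('net_margin', 'profitability'),
--     ('operating_margin', 'profitability'),
--     ('quick_ratio', 'liquidity'),
--     ('receivables_turnover', 'efficiency'),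
--     ('roa', 'profitability'),
--     ('roe', 'profitability'),
-- ]
--
-- def get_ratio_category(ratio_name: str) -> str:
--     """Get the category of a ratio"""
--     lo, hi = 0, len(_SORTED_TABLE)
--     while lo < hi:
--         mid = (lo + hi) // 2
--         if _SORTED_TABLE[mid][0] < ratio_name:
--             lo = mid + 1
--         else:
--             hi = mid
--     if lo < len(_SORTED_TABLE) and _SORTED_TABLE[lo][0] == ratio_name:
--         return _SORTED_TABLE[lo][1]
--     return 'other'
-- ===== Notes on version B (the rewrite author's own statement) =====
-- stated objective: alternative
-- what changed: Replaces A's linear scan over a nested category->names dict (inner 'in' membership test per category) with binary search over a flat table of (name, category) pairs pre-sorted by name, followed by one equality check; A's loop and membership test are gone.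
import Mathlib
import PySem

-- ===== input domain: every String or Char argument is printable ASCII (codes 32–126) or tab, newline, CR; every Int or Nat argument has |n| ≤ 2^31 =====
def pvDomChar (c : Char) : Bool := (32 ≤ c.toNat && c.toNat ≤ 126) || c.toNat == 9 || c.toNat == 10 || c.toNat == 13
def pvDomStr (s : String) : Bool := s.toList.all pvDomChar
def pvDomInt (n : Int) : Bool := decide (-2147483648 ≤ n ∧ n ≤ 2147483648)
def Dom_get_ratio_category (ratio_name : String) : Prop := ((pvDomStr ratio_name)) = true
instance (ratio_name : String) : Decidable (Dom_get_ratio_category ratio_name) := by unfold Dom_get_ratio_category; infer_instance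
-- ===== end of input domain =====

-- B replaces A's loop-with-membership scan by binary search over a name-sorted flat table (alternative algorithm).


-- ===== PORT A =====
-- the nested dict literal: category → list of ratio names, in insertion order
def pvCategories : PySem.Dict String (List String) :=
  PySem.Dict.ofList
    [("profitability", ["gross_margin", "operating_margin", "net_margin", "roe", "roa"]),
     ("liquidity", ["current_ratio", "quick_ratio", "cash_ratio"]),
     ("solvency", ["debt_to_equity", "debt_to_assets", "interest_coverage"]),
     ("efficiency", ["asset_turnover", "inventory_turnover", "receivables_turnover"])]

-- 'for category, ratios in categories.items(): if ratio_name in ratios: return category'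
def pvScan (ratio_name : String) : List (String × List String) → String
  | [] => "other"
  | (category, ratios) :: rest =>
      if ratios.contains ratio_name then category else pvScan ratio_name rest

def get_ratio_category (ratio_name : String) : String :=
  pvScan ratio_name pvCategories.items

-- ===== PORT B =====
-- the flat (name, category) table, sorted by name, as in Source B
def pvSortedTable : List (String × String) :=
  [("asset_turnover", "efficiency"),
   ("cash_ratio", "liquidity"),
   ("current_ratio", "liquidity"),
   ("debt_to_assets", "solvency"),
   ("debt_to_equity", "solvency"),
   ("gross_margin", "profitability"),
   ("interest_coverage", "solvency"),
   ("inventory_turnover", "efficiency"),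
   ("net_margin", "profitability"),
   ("operating_margin", "profitability"),
   ("quick_ratio", "liquidity"),
   ("receivables_turnover", "efficiency"),
   ("roa", "profitability"),
   ("roe", "profitability")]

-- the 'while lo < hi' binary-search loop; fuel only makes the loop total
-- (initial fuel = table length ≥ number of iterations). Python's string `<`
-- is ported as code-point lexicographic `<` on the char lists (exact per PYSEM).
def pvBsearch (s : String) : Nat → Nat → Nat → Nat
  | 0, lo, _ => lo
  | fuel + 1, lo, hi =>
      if lo < hi then
        let mid := (lo + hi) / 2
        if (pvSortedTable.getD mid ("", "")).1.toList < s.toList then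
          pvBsearch s fuel (mid + 1) hi
        else
          pvBsearch s fuel lo mid
      else lo

def get_ratio_category_alt (ratio_name : String) : String :=
  let lo := pvBsearch ratio_name pvSortedTable.length 0 pvSortedTable.length
  if lo < pvSortedTable.length ∧ (pvSortedTable.getD lo ("", "")).1 = ratio_name then
    (pvSortedTable.getD lo ("", "")).2
  else "other"

-- ===== PRECONDITION & SPEC =====
def Spec_get_ratio_category (ratio_name : String) (out : String) : Prop := out = get_ratio_category_alt ratio_name
instance (ratio_name : String) (out : String) : Decidable (Spec_get_ratio_category ratio_name out) := by unfold Spec_get_ratio_category; infer_instance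

-- ===== CLAIM (what is proved, stated in full; the proofs are below) =====
def Claim_equal_get_ratio_category : Prop := ∀ (ratio_name : String), Dom_get_ratio_category ratio_name → Spec_get_ratio_category ratio_name (get_ratio_category ratio_name)

-- ===== LEMMAS AND PROOFS =====

def pvNames : List String :=
  ["gross_margin", "operating_margin", "net_margin", "roe", "roa",
   "current_ratio", "quick_ratio", "cash_ratio",
   "debt_to_equity", "debt_to_assets", "interest_coverage",
   "asset_turnover", "inventory_turnover", "receivables_turnover"]

-- if s names no ratio, the binary search's final equality test fails and B returns "other"
theorem pvB_other (s : String) (h : s ∉ pvNames) : get_ratio_category_alt s = "other" := by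
  unfold get_ratio_category_alt
  generalize pvBsearch s pvSortedTable.length 0 pvSortedTable.length = k
  show (if k < pvSortedTable.length ∧ (pvSortedTable.getD k ("", "")).1 = s then
          (pvSortedTable.getD k ("", "")).2 else "other") = "other"
  split_ifs with hc
  · exfalso
    obtain ⟨hk, hn⟩ := hc
    apply h
    have hk' : k < 14 := by simpa [pvSortedTable] using hk
    interval_cases k <;> simp_all [pvSortedTable, pvNames]
  · rfl

-- if s names no ratio, A's scan falls through every category and returns "other"
theorem pvA_other (s : String) (h : s ∉ pvNames) : get_ratio_category s = "other" := by
  have hc : pvCategories.items =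
      [("profitability", ["gross_margin", "operating_margin", "net_margin", "roe", "roa"]),
       ("liquidity", ["current_ratio", "quick_ratio", "cash_ratio"]),
       ("solvency", ["debt_to_equity", "debt_to_assets", "interest_coverage"]),
       ("efficiency", ["asset_turnover", "inventory_turnover", "receivables_turnover"])] := by
    decide
  simp only [pvNames, List.mem_cons, List.not_mem_nil, or_false, not_or] at h
  simp only [get_ratio_category, hc, pvScan, List.contains_cons, List.contains_nil]
  obtain ⟨h1, h2, h3, h4, h5, h6, h7, h8, h9, h10, h11, h12, h13, h14⟩ := h
  simp [h1, h2, h3, h4, h5, h6, h7, h8, h9, h10, h11, h12, h13, h14]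

theorem pv_eq (s : String) : get_ratio_category s = get_ratio_category_alt s := by
  by_cases hm : s ∈ pvNames
  · fin_cases hm <;> decide
  · rw [pvA_other s hm, pvB_other s hm]

-- ===== VERDICT (by name: the statement is the Claim_ definition above) =====
theorem get_ratio_category_spec : Claim_equal_get_ratio_category := by
  intro s _
  exact pv_eq s
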